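-- pv_equiv track=rewrite | github.com/pypi-data/pypi-mirror-336 | packages/ecida/ecida-0.0.27.tar.gz/ecida-0.0.27/Ecida.py | convert_to_dns_name
-- ===== SOURCE A (Python) =====
-- def convert_to_dns_name(string):
--     # Convert the string to lowercase
--     string = string.lower()
--
--     # Replace non-alphanumeric characters with hyphens
--     string = "".join("-" if not c.isalnum() else c for c in string)
--
--     # Remove leading and trailing hyphens
--     string = string.strip("-")
--
--     # Replace multiple consecutive hyphens with a single hyphen
--     string = "-".join(filter(None, string.split("-")))
--
--     # Ensure the resulting string is not empty
--     if not string: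
--         raise ValueError("Invalid string: Cannot convert to DNS name.")
--
--     return string
-- ===== SOURCE B (Python) =====
-- def convert_to_dns_name(string):
--     out = []
--     for c in string.lower():
--         if c.isalnum():
--             out.append(c)
--         elif out and out[-1] != '-':
--             out.append('-')
--     if out and out[-1] == '-':
--         out.pop()
--     if not out:
--         raise ValueError("Invalid string: Cannot convert to DNS name.")
--     return "".join(out)
-- ===== Notes on version B (the rewrite author's own statement) =====
-- stated objective: simpler
-- what changed: Replaced the five-stage replace/strip/split/filter/join string pipeline by a single left-to-right accumulator pass that suppresses leading and repeated hyphens inline and drops one trailing hyphen at the end.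
import Mathlib
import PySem

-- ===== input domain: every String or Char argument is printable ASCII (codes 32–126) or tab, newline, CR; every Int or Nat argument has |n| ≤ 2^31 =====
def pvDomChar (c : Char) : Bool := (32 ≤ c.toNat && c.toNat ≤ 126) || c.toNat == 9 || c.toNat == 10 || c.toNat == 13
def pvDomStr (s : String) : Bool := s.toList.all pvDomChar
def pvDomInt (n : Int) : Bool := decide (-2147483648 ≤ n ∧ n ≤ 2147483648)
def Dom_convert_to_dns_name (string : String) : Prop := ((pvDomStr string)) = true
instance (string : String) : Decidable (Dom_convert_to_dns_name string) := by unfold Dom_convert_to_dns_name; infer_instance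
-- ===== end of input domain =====

-- B replaces A's replace/strip/split/filter/join pipeline by one accumulator pass (objective: simpler).


-- ===== PORT A =====
def convert_to_dns_name (string : String) : String :=
  -- string = string.lower()
  let cs1 : List Char := PySem.Chars.lower string.toList
  -- string = "".join("-" if not c.isalnum() else c for c in string)
  let cs2 : List Char := PySem.Chars.join [] (cs1.map (fun c => if ¬ (PySem.Chars.isalnum c) then ['-'] else [c]))
  -- string = string.strip("-")
  let cs3 : List Char := PySem.Chars.stripChars cs2 ['-']
  -- string = "-".join(filter(None, string.split("-")))
  let cs4 : List Char := PySem.Chars.join ['-'] ((PySem.Chars.splitOn cs3 ['-']).filter (fun p => p ≠ []))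
  -- if not string: raise ValueError(...)  -- the raise is excluded by Pre_convert_to_dns_name
  if cs4 = [] then "" else String.mk cs4

-- ===== PORT B =====
def convert_to_dns_name_alt (string : String) : String :=
  let cs : List Char := PySem.Chars.lower string.toList
  -- out = []; for c in ...: append c / a single '-' (never leading, never doubled)
  let out : List Char := cs.foldl
    (fun acc c =>
      if PySem.Chars.isalnum c then acc ++ [c]
      else if acc ≠ [] ∧ acc.getLast? ≠ some '-' then acc ++ ['-'] else acc) []
  -- if out and out[-1] == '-': out.pop()
  let out := if out.getLast? = some '-' then out.dropLast else out
  -- if not out: raise ValueError(...)  -- excluded by Pre_convert_to_dns_name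
  if out = [] then "" else String.mk out

-- ===== PRECONDITION & SPEC =====
-- Pre_ excludes exactly the inputs (no alphanumeric character at all) on which Python A — and B — raises ValueError.
def Pre_convert_to_dns_name (string : String) : Prop :=
  string.toList.any PySem.Chars.isalnum = true
instance (string : String) : Decidable (Pre_convert_to_dns_name string) := by
  unfold Pre_convert_to_dns_name; infer_instance

def pvWitness_convert_to_dns_name : String := "Hello, World!"

def Spec_convert_to_dns_name (string : String) (out : String) : Prop := out = convert_to_dns_name_alt string
instance (string : String) (out : String) : Decidable (Spec_convert_to_dns_name string out) := by unfold Spec_convert_to_dns_name; infer_instance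

-- ===== CLAIM (what is proved, stated in full; the proofs are below) =====
def Claim_equal_convert_to_dns_name : Prop := ∀ (string : String), Dom_convert_to_dns_name string → Pre_convert_to_dns_name string → Spec_convert_to_dns_name string (convert_to_dns_name string)

-- ===== LEMMAS AND PROOFS =====

/-- Specification of splitting on '-': first piece and remaining pieces. -/
def pvSplit : List Char → List Char × List (List Char)
  | [] => ([], [])
  | c :: m => if c = '-' then ([], (pvSplit m).1 :: (pvSplit m).2)
              else (c :: (pvSplit m).1, (pvSplit m).2)

/-- Prepend '-' unless empty. -/
def pvHy (r : List Char) : List Char := if r = [] then [] else '-' :: r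

mutual
/-- The normalized DNS name of a hyphen-mapped list (fresh word position). -/
def pvN : List Char → List Char
  | [] => []
  | c :: m => if c = '-' then pvN m else c :: pvN' m
/-- Normalizer state after at least one emitted character. -/
def pvN' : List Char → List Char
  | [] => []
  | c :: m => if c = '-' then pvHy (pvN m) else c :: pvN' m
end

theorem pvGo_eq (l : List Char) : ∀ (fuel : Nat) (cur : List Char) (acc : List (List Char)),
    l.length < fuel →
    PySem.Chars.splitOn.go ['-'] fuel l cur acc
      = acc.reverse ++ (cur.reverse ++ (pvSplit l).1) :: (pvSplit l).2 := by
  induction l with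
  | nil =>
    intro fuel cur acc h
    match fuel with
    | f + 1 =>
      rw [PySem.Chars.splitOn.go.eq_def]
      simp [pvSplit]
  | cons c rest ih =>
    intro fuel cur acc h
    match fuel with
    | f + 1 =>
      have hcnt : rest.length < f := by simp at h; omega
      by_cases hc : c = '-'
      · subst hc
        rw [PySem.Chars.splitOn.go.eq_def]
        simp only [List.isPrefixOf, BEq.rfl, Bool.true_and, if_true]
        rw [show List.drop (['-'] : List Char).length ('-' :: rest) = rest by simp]
        rw [ih f [] (cur.reverse :: acc) hcnt]
        simp [pvSplit]
      · have hpre : List.isPrefixOf ['-'] (c::rest) = false := by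
          simp [List.isPrefixOf]
          exact fun hh => hc hh.symm
        rw [PySem.Chars.splitOn.go.eq_def]
        simp only [hpre, Bool.false_eq_true, if_false]
        rw [ih f (c::cur) acc hcnt]
        simp [pvSplit, hc]

theorem pvSplitOn_eq (l : List Char) :
    PySem.Chars.splitOn l ['-'] = (pvSplit l).1 :: (pvSplit l).2 := by
  have h := pvGo_eq l (l.length + 1) [] [] (by omega)
  simpa [PySem.Chars.splitOn] using h

theorem pvJoin_eq (m : List Char) :
    PySem.Chars.join ['-'] (((pvSplit m).1 :: (pvSplit m).2).filter (fun p => p ≠ [])) = pvN m ∧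
    ∀ pre : List Char, pre ≠ [] →
      PySem.Chars.join ['-'] (((pre ++ (pvSplit m).1) :: (pvSplit m).2).filter (fun p => p ≠ [])) = pre ++ pvN' m := by
  induction m with
  | nil =>
    constructor
    · simp [pvSplit, pvN, PySem.Chars.join, List.intercalate]
    · intro pre hpre
      simp [pvSplit, pvN', PySem.Chars.join, hpre, List.intercalate]
  | cons c m ih =>
    obtain ⟨ih1, ih2⟩ := ih
    by_cases hc : c = '-'
    · subst hc
      constructor
      · simpa [pvSplit, pvN] using ih1
      · intro pre hpre
        rw [show pvSplit ('-'::m) = ([], (pvSplit m).1 :: (pvSplit m).2) from by simp [pvSplit]]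
        rw [show pvN' ('-'::m) = pvHy (pvN m) from by simp [pvN']]
        simp only [List.append_nil]
        rw [List.filter_cons_of_pos (by simpa using hpre)]
        rcases hX : ((pvSplit m).1 :: (pvSplit m).2).filter (fun p => p ≠ []) with _ | ⟨x, xs⟩
        · have hN : pvN m = [] := by
            rw [← ih1, hX]; simp [PySem.Chars.join, List.intercalate]
          rw [hN]
          simp [pvHy, PySem.Chars.join, List.intercalate]
        · have hx : x ≠ [] := by
            have : x ∈ ((pvSplit m).1 :: (pvSplit m).2).filter (fun p => p ≠ []) := by
              rw [hX]; exact List.mem_cons_self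
            simpa using (List.of_mem_filter this)
          have hN : pvN m = PySem.Chars.join ['-'] (x :: xs) := by rw [← ih1, hX]
          have hNne : pvN m ≠ [] := by
            rw [hN]
            rcases xs with _ | ⟨y, ys⟩
            · simpa [PySem.Chars.join, List.intercalate] using hx
            · rw [PySem.Chars.join_cons_cons]
              intro hcon
              exact hx (List.append_eq_nil_iff.mp ((List.append_eq_nil_iff.mp hcon).1)).1
          rw [PySem.Chars.join_cons_cons, ← hN]
          simp [pvHy, hNne]
    · constructor
      · have := ih2 [c] (by simp)
        simpa [pvSplit, hc, pvN] using this
      · intro pre hpre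
        have := ih2 (pre ++ [c]) (by simp)
        simp only [pvSplit, if_neg hc, pvN']
        rw [show pre ++ c :: (pvSplit m).1 = (pre ++ [c]) ++ (pvSplit m).1 by simp]
        rw [this]
        simp

theorem pvN_all_hyphen (t : List Char) (h : ∀ c ∈ t, c = '-') : pvN t = [] ∧ pvN' t = [] := by
  induction t with
  | nil => simp [pvN, pvN']
  | cons c t ih =>
    have hc : c = '-' := h c (by simp)
    have ht : ∀ c ∈ t, c = '-' := fun x hx => h x (by simp [hx])
    obtain ⟨ih1, ih2⟩ := ih ht
    subst hc
    simp [pvN, pvN', ih1, pvHy]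

theorem pvN_append (m t : List Char) (h : ∀ c ∈ t, c = '-') :
    pvN (m ++ t) = pvN m ∧ pvN' (m ++ t) = pvN' m := by
  induction m with
  | nil => simpa [pvN, pvN'] using pvN_all_hyphen t h
  | cons c m ih =>
    obtain ⟨ih1, ih2⟩ := ih
    by_cases hc : c = '-'
    · subst hc; simp [pvN, pvN', ih1]
    · simp [pvN, pvN', hc, ih2]

theorem pvN_dropWhile (m : List Char) :
    pvN (m.dropWhile (fun c => (['-'] : List Char).contains c)) = pvN m := by
  induction m with
  | nil => rfl
  | cons c m ih =>
    by_cases hc : c = '-'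
    · subst hc
      rw [List.dropWhile_cons_of_pos (by simp)]
      simpa [pvN] using ih
    · rw [List.dropWhile_cons_of_neg (by simpa using fun hh => hc hh)]

theorem pvN_strip (m : List Char) : pvN (PySem.Chars.stripChars m ['-']) = pvN m := by
  unfold PySem.Chars.stripChars
  set p : Char → Bool := fun c => (['-'] : List Char).contains c with hp
  set x : List Char := m.dropWhile p with hx
  have hdecomp : x = (x.reverse.dropWhile p).reverse ++ (x.reverse.takeWhile p).reverse := by
    calc x = x.reverse.reverse := by simp
      _ = (x.reverse.takeWhile p ++ x.reverse.dropWhile p).reverse := by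
            rw [List.takeWhile_append_dropWhile]
      _ = (x.reverse.dropWhile p).reverse ++ (x.reverse.takeWhile p).reverse := by
            rw [List.reverse_append]
  have hall : ∀ c ∈ (x.reverse.takeWhile p).reverse, c = '-' := by
    intro c hc
    rw [List.mem_reverse] at hc
    have := List.mem_takeWhile_imp hc
    simpa [hp] using this
  calc pvN (x.reverse.dropWhile p).reverse
      = pvN ((x.reverse.dropWhile p).reverse ++ (x.reverse.takeWhile p).reverse) :=
        (pvN_append _ _ hall).1.symm
    _ = pvN x := by rw [← hdecomp]
    _ = pvN m := pvN_dropWhile m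

/-- B's loop step on the mapped alphabet. -/
def pvStep (acc : List Char) (c : Char) : List Char :=
  if c ≠ '-' then acc ++ [c]
  else if acc ≠ [] ∧ acc.getLast? ≠ some '-' then acc ++ ['-'] else acc

def pvDT (acc : List Char) : List Char :=
  if acc.getLast? = some '-' then acc.dropLast else acc

theorem pvFold_eq (m : List Char) :
    pvDT (m.foldl pvStep []) = pvN m ∧
    (∀ acc : List Char, acc ≠ [] → acc.getLast? ≠ some '-' → pvDT (m.foldl pvStep acc) = acc ++ pvN' m) ∧
    (∀ b : List Char, pvDT (m.foldl pvStep (b ++ ['-'])) = b ++ pvHy (pvN m)) := by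
  induction m with
  | nil =>
    refine ⟨by simp [pvDT, pvN], fun acc hne hlast => ?_, fun b => ?_⟩
    · simp [pvDT, pvN', hlast]
    · simp [pvDT, pvHy, pvN]
  | cons c m ih =>
    obtain ⟨h1, h2, h3⟩ := ih
    by_cases hc : c = '-'
    · subst hc
      refine ⟨?_, fun acc hne hlast => ?_, fun b => ?_⟩
      · simpa [pvStep, pvN] using h1
      · rw [List.foldl_cons, show pvStep acc '-' = acc ++ ['-'] by simp [pvStep, hne, hlast]]
        simpa [pvN'] using h3 acc
      · rw [List.foldl_cons, show pvStep (b ++ ['-']) '-' = b ++ ['-'] by simp [pvStep]]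
        simpa [pvN] using h3 b
    · refine ⟨?_, fun acc hne hlast => ?_, fun b => ?_⟩
      · rw [List.foldl_cons, show pvStep [] c = [c] by simp [pvStep, hc]]
        have := h2 [c] (by simp) (by simp [hc])
        simpa [pvN, hc] using this
      · rw [List.foldl_cons, show pvStep acc c = acc ++ [c] by simp [pvStep, hc]]
        have := h2 (acc ++ [c]) (by simp) (by simp [hc])
        simpa [pvN', hc] using this
      · rw [List.foldl_cons, show pvStep (b ++ ['-']) c = b ++ ['-'] ++ [c] by simp [pvStep, hc]]
        have := h2 (b ++ ['-'] ++ [c]) (by simp) (by simp [hc])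
        rw [this]
        simp [pvN, pvHy, hc]

theorem pvMain (cs : List Char) :
    pvDT (cs.foldl (fun acc c =>
      if PySem.Chars.isalnum c then acc ++ [c]
      else if acc ≠ [] ∧ acc.getLast? ≠ some '-' then acc ++ ['-'] else acc) [])
    = pvN (cs.map (fun c => if PySem.Chars.isalnum c then c else '-')) := by
  have hfun : (fun (acc : List Char) (c : Char) =>
      if PySem.Chars.isalnum c then acc ++ [c]
      else if acc ≠ [] ∧ acc.getLast? ≠ some '-' then acc ++ ['-'] else acc)
      = fun acc c => pvStep acc (if PySem.Chars.isalnum c then c else '-') := by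
    funext acc c
    by_cases h : PySem.Chars.isalnum c
    · have hc : c ≠ '-' := by
        intro hcon; subst hcon; exact absurd h (by decide)
      simp [pvStep, h, hc]
    · simp [pvStep, h]
  rw [hfun, ← List.foldl_map]
  exact (pvFold_eq (cs.map (fun c => if PySem.Chars.isalnum c then c else '-'))).1

theorem pvA_eq (string : String) :
    convert_to_dns_name string = convert_to_dns_name_alt string := by
  show (if PySem.Chars.join ['-'] ((PySem.Chars.splitOn
          (PySem.Chars.stripChars
            (PySem.Chars.join [] ((PySem.Chars.lower string.toList).map
              (fun c => if ¬ (PySem.Chars.isalnum c) then ['-'] else [c]))) ['-']) ['-']).filter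
          (fun p => p ≠ [])) = []
      then ""
      else String.mk (PySem.Chars.join ['-'] ((PySem.Chars.splitOn
          (PySem.Chars.stripChars
            (PySem.Chars.join [] ((PySem.Chars.lower string.toList).map
              (fun c => if ¬ (PySem.Chars.isalnum c) then ['-'] else [c]))) ['-']) ['-']).filter
          (fun p => p ≠ []))))
    = (if (if ((PySem.Chars.lower string.toList).foldl
            (fun acc c =>
              if PySem.Chars.isalnum c then acc ++ [c]
              else if acc ≠ [] ∧ acc.getLast? ≠ some '-' then acc ++ ['-'] else acc) []).getLast? = some '-'
          then ((PySem.Chars.lower string.toList).foldl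
            (fun acc c =>
              if PySem.Chars.isalnum c then acc ++ [c]
              else if acc ≠ [] ∧ acc.getLast? ≠ some '-' then acc ++ ['-'] else acc) []).dropLast
          else (PySem.Chars.lower string.toList).foldl
            (fun acc c =>
              if PySem.Chars.isalnum c then acc ++ [c]
              else if acc ≠ [] ∧ acc.getLast? ≠ some '-' then acc ++ ['-'] else acc) []) = []
      then ""
      else String.mk (if ((PySem.Chars.lower string.toList).foldl
            (fun acc c =>
              if PySem.Chars.isalnum c then acc ++ [c]
              else if acc ≠ [] ∧ acc.getLast? ≠ some '-' then acc ++ ['-'] else acc) []).getLast? = some '-'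
          then ((PySem.Chars.lower string.toList).foldl
            (fun acc c =>
              if PySem.Chars.isalnum c then acc ++ [c]
              else if acc ≠ [] ∧ acc.getLast? ≠ some '-' then acc ++ ['-'] else acc) []).dropLast
          else (PySem.Chars.lower string.toList).foldl
            (fun acc c =>
              if PySem.Chars.isalnum c then acc ++ [c]
              else if acc ≠ [] ∧ acc.getLast? ≠ some '-' then acc ++ ['-'] else acc) []))
  set cs1 : List Char := PySem.Chars.lower string.toList with hcs1
  set f : Char → Char := fun c => if PySem.Chars.isalnum c then c else '-' with hf
  have hcs2 : PySem.Chars.join []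
      (cs1.map (fun c => if ¬ (PySem.Chars.isalnum c) then ['-'] else [c])) = cs1.map f := by
    rw [show (cs1.map (fun c => if ¬ (PySem.Chars.isalnum c) then ['-'] else [c]))
          = (cs1.map f).map (fun c => [c]) by
      rw [List.map_map]
      apply List.map_congr_left
      intro c _
      by_cases h : PySem.Chars.isalnum c <;> simp [hf, h]]
    exact PySem.Chars.join_nil_singletons _
  have hDT : ∀ acc : List Char,
      (if acc.getLast? = some '-' then acc.dropLast else acc) = pvDT acc := fun _ => rfl
  rw [hcs2, pvSplitOn_eq, (pvJoin_eq (PySem.Chars.stripChars (cs1.map f) ['-'])).1, pvN_strip,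
    hDT, pvMain]

-- ===== VERDICT (by name: the statement is the Claim_ definition above) =====
set_option maxHeartbeats 1000000 in
theorem convert_to_dns_name_spec : Claim_equal_convert_to_dns_name := by
  intro string _ _
  unfold Spec_convert_to_dns_name
  exact pvA_eq string
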